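-- pv_equiv track=rewrite | github.com/Valiev/contests | adventofcode.com/2024/day04.py | lines_diag_down
-- ===== SOURCE A (Python) =====
-- def lines_diag_down(lines):
--     X_MAX = len(lines[0])
--     Y_MAX = len(lines)
--     for d in range(X_MAX + Y_MAX):
--         x = 0
--         y = Y_MAX - 1 - d
--         while y < 0:
--             y += 1
--             x += 1
--         if x >= X_MAX:
--             break
--         diag = []
--         while x < X_MAX and y < Y_MAX:
--             diag.append(lines[y][x])
--             x += 1
--             y += 1
--         yield ''.join(diag)
-- ===== SOURCE B (Python) =====
-- def lines_diag_down(lines):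
--     x_max = len(lines[0])
--     groups = {}
--     for y, row in enumerate(lines):
--         for x in range(x_max):
--             groups.setdefault(x - y, []).append(row[x])
--     for k in sorted(groups):
--         yield ''.join(groups[k])
-- ===== Notes on version B (the rewrite author's own statement) =====
-- stated objective: alternative
-- what changed: Replaces A's per-diagonal arithmetic walks (outer loop over diagonal indices with a skip loop and a walk loop) by a single grouping pass that buckets every character under key x - y in a dict, then emits the buckets in sorted key order.
import Mathlib
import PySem

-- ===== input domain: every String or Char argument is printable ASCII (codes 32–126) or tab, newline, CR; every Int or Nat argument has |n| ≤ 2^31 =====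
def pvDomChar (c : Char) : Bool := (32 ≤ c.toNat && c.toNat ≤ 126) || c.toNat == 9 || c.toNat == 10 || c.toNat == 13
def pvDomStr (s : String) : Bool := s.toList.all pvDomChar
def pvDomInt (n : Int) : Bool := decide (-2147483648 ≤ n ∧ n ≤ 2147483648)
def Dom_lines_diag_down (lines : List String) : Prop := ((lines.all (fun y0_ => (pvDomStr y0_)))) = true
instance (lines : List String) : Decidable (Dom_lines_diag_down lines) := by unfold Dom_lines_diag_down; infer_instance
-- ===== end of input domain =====

-- B replaces A's per-diagonal arithmetic walks by one grouping pass bucketing chars under key x - y,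
-- then emitting buckets in sorted key order (objective: alternative decomposition, similar cost).

-- ===== PORT A =====
-- 'while y < 0: y += 1; x += 1'
def pvSkipA (x y : Int) : Int × Int :=
  if y < 0 then pvSkipA (x + 1) (y + 1) else (x, y)
termination_by (-y).toNat
decreasing_by omega

-- 'while x < X_MAX and y < Y_MAX: diag.append(lines[y][x]); x += 1; y += 1'
def pvDiagA (lines : List String) (X Y : Int) (x y : Int) (acc : List Char) : List Char :=
  if x < X ∧ y < Y then
    pvDiagA lines X Y (x + 1) (y + 1)
      (acc ++ [PySem.List.pyGetD (PySem.List.pyGetD lines y "").toList x ' '])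
  else acc
termination_by (X - x).toNat
decreasing_by omega

-- 'for d in range(X_MAX + Y_MAX): … if x >= X_MAX: break … yield ''.join(diag)'
def pvLoopA (lines : List String) (X Y : Int) : List Int → List String → List String
  | [], out => out
  | d :: ds, out =>
    let s := pvSkipA 0 (Y - 1 - d)
    if s.1 ≥ X then out
    else pvLoopA lines X Y ds (out ++ [String.ofList (pvDiagA lines X Y s.1 s.2 [])])

def lines_diag_down (lines : List String) : List String :=
  let X : Int := PySem.Str.len (PySem.List.pyGetD lines 0 "")
  let Y : Int := PySem.List.len lines
  pvLoopA lines X Y (PySem.List.pyRange 0 (X + Y)) []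

-- ===== PORT B =====
def lines_diag_down_alt (lines : List String) : List String :=
  let xmax : Int := PySem.Str.len (PySem.List.pyGetD lines 0 "")
  let groups : PySem.Dict Int (List Char) :=
    (PySem.List.enumerate lines).foldl
      (fun g p =>
        (PySem.List.pyRange 0 xmax).foldl
          (fun g x => g.modify (x - p.1) [] (fun l => l ++ [PySem.List.pyGetD p.2.toList x ' ']))
          g)
      PySem.Dict.empty
  (PySem.List.sorted groups.keys (fun k => k)).map (fun k => String.ofList (groups.getD k []))

-- ===== PRECONDITION & SPEC =====
-- Pre_ excludes exactly the inputs on which the Python A raises IndexError: the empty list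
-- (lines[0]) and ragged grids with a row shorter than the first row (lines[y][x]).
def Pre_lines_diag_down (lines : List String) : Prop :=
  lines ≠ [] ∧ ∀ s ∈ lines, (lines.headD "").toList.length ≤ s.toList.length
instance (lines : List String) : Decidable (Pre_lines_diag_down lines) := by
  unfold Pre_lines_diag_down; infer_instance

def pvWitness_lines_diag_down : List String := ["abc", "def"]

def Spec_lines_diag_down (lines : List String) (out : List String) : Prop := out = lines_diag_down_alt lines
instance (lines : List String) (out : List String) : Decidable (Spec_lines_diag_down lines out) := by unfold Spec_lines_diag_down; infer_instance

-- ===== CLAIM (what is proved, stated in full; the proofs are below) =====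
def Claim_equal_lines_diag_down : Prop := ∀ (lines : List String), Dom_lines_diag_down lines → Pre_lines_diag_down lines → Spec_lines_diag_down lines (lines_diag_down lines)

-- ===== LEMMAS AND PROOFS =====

-- the character of row j on diagonal k (both ports read it through the same total lookups)
def pvCharAt (lines : List String) (j k : Int) : Char :=
  PySem.List.pyGetD (PySem.List.pyGetD lines j "").toList (j + k) ' '

-- diagonal k, rows max 0 (-k) .. Y-1, kept while the column stays < X
def pvDiagSpec (lines : List String) (X k : Int) : List Char :=
  (PySem.List.pyRange (max 0 (-k)) (PySem.List.len lines)).flatMap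
    (fun j => if j + k < X then [pvCharAt lines j k] else [])

-- all (key, char) pairs produced by B's grouping pass, in scan order
def pvPairs (lines : List String) (X : Int) : List (Int × Char) :=
  (PySem.List.enumerate lines).flatMap
    (fun p => (PySem.List.pyRange 0 X).map (fun x => (x - p.1, PySem.List.pyGetD p.2.toList x ' ')))

lemma pvSkipA_eq : ∀ (n : Nat) (x y : Int), (-y).toNat = n →
    pvSkipA x y = if y < 0 then (x - y, 0) else (x, y) := by
  intro n
  induction n with
  | zero =>
    intro x y h
    rw [pvSkipA]
    have hy : ¬ y < 0 := by omega
    simp [hy]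
  | succ m ih =>
    intro x y h
    rw [pvSkipA]
    by_cases hy : y < 0
    · rw [if_pos hy, if_pos hy, ih (x + 1) (y + 1) (by omega)]
      by_cases hy1 : y + 1 < 0
      · rw [if_pos hy1, show x + 1 - (y + 1) = x - y from by omega]
      · rw [if_neg hy1, show y + 1 = 0 from by omega, show x + 1 = x - y from by omega]
    · simp [hy]

lemma pvDiagA_eq (lines : List String) (X Y k : Int) :
    ∀ (n : Nat) (y : Int) (acc : List Char), (Y - y).toNat = n →
    pvDiagA lines X Y (y + k) y acc
      = acc ++ (PySem.List.pyRange y Y).flatMap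
          (fun j => if j + k < X then [pvCharAt lines j k] else []) := by
  intro n
  induction n with
  | zero =>
    intro y acc h
    rw [pvDiagA, PySem.List.pyRange_one_eq_nil (by omega)]
    have : ¬ (y + k < X ∧ y < Y) := by omega
    simp [this]
  | succ m ih =>
    intro y acc h
    by_cases hy : y < Y
    · rw [PySem.List.pyRange_one_cons hy, List.flatMap_cons, pvDiagA]
      by_cases hx : y + k < X
      · rw [if_pos ⟨hx, hy⟩]
        have hxx : y + k + 1 = (y + 1) + k := by omega
        rw [hxx, ih (y + 1) _ (by omega), if_pos hx]
        simp [pvCharAt]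
      · rw [if_neg (by tauto), if_neg hx]
        have hnil : (PySem.List.pyRange (y + 1) Y).flatMap
            (fun j => if j + k < X then [pvCharAt lines j k] else []) = [] := by
          rw [List.flatMap_eq_nil_iff]
          intro j hj
          rw [PySem.List.mem_pyRange_one] at hj
          rw [if_neg (by omega)]
        rw [hnil]
        simp
    · rw [pvDiagA, PySem.List.pyRange_one_eq_nil (by omega)]
      have : ¬ (y + k < X ∧ y < Y) := by omega
      simp [this]

lemma pvLoopA_eq (lines : List String) (X Y : Int) (hX : 1 ≤ X) (_hY : 1 ≤ Y)
    (hYlen : Y = PySem.List.len lines) :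
    ∀ (n : Nat) (a : Int) (out : List String), (X + Y - a).toNat = n → 0 ≤ a →
    pvLoopA lines X Y (PySem.List.pyRange a (X + Y)) out
      = out ++ (PySem.List.pyRange a (X + Y - 1)).map
          (fun d => String.ofList (pvDiagSpec lines X (d - (Y - 1)))) := by
  intro n
  induction n with
  | zero =>
    intro a out h ha
    rw [PySem.List.pyRange_one_eq_nil (by omega), PySem.List.pyRange_one_eq_nil (by omega)]
    simp [pvLoopA]
  | succ m ih =>
    intro a out h ha
    by_cases hab : a < X + Y
    · rw [PySem.List.pyRange_one_cons hab]
      show (let s := pvSkipA 0 (Y - 1 - a);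
        if s.1 ≥ X then out
        else pvLoopA lines X Y (PySem.List.pyRange (a + 1) (X + Y))
          (out ++ [String.ofList (pvDiagA lines X Y s.1 s.2 [])])) = _
      rw [pvSkipA_eq ((-(Y - 1 - a)).toNat) 0 (Y - 1 - a) rfl]
      by_cases hlow : Y - 1 - a < 0
      · -- start below the grid: s = (a - (Y - 1), 0)
        rw [if_pos hlow]
        by_cases hbreak : a - (Y - 1) ≥ X
        · -- break: a = X + Y - 1
          rw [if_pos (by simpa using hbreak), PySem.List.pyRange_one_eq_nil (by omega)]
          simp
        · rw [if_neg (by simpa using hbreak)]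
          have hd : (0 : Int) - (Y - 1 - a) = 0 + (a - (Y - 1)) := by omega
          simp only [hd]
          rw [pvDiagA_eq lines X Y (a - (Y - 1)) ((Y - 0).toNat) 0 [] rfl]
          rw [ih (a + 1) _ (by omega) (by omega)]
          rw [PySem.List.pyRange_one_cons (a := a) (b := X + Y - 1) (by omega), List.map_cons]
          have hmax : max 0 (-(a - (Y - 1))) = 0 := by omega
          have hspec : pvDiagSpec lines X (a - (Y - 1))
              = (PySem.List.pyRange 0 Y).flatMap
                  (fun j => if j + (a - (Y - 1)) < X then [pvCharAt lines j (a - (Y - 1))] else []) := by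
            rw [pvDiagSpec, hmax, ← hYlen]
          rw [hspec]
          simp
      · -- start inside: s = (0, Y - 1 - a), no break since X ≥ 1
        rw [if_neg hlow, if_neg (by simp; omega)]
        have hd : (0 : Int) = (Y - 1 - a) + (a - (Y - 1)) := by omega
        rw [show pvDiagA lines X Y 0 (Y - 1 - a) [] =
            pvDiagA lines X Y ((Y - 1 - a) + (a - (Y - 1))) (Y - 1 - a) [] by rw [← hd]]
        rw [pvDiagA_eq lines X Y (a - (Y - 1)) ((Y - (Y - 1 - a)).toNat) (Y - 1 - a) [] rfl]
        rw [ih (a + 1) _ (by omega) (by omega)]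
        rw [PySem.List.pyRange_one_cons (a := a) (b := X + Y - 1) (by omega), List.map_cons]
        have hmax : max 0 (-(a - (Y - 1))) = Y - 1 - a := by omega
        have hspec : pvDiagSpec lines X (a - (Y - 1))
            = (PySem.List.pyRange (Y - 1 - a) Y).flatMap
                (fun j => if j + (a - (Y - 1)) < X then [pvCharAt lines j (a - (Y - 1))] else []) := by
          rw [pvDiagSpec, hmax, ← hYlen]
        rw [hspec]
        simp
    · rw [PySem.List.pyRange_one_eq_nil (by omega), PySem.List.pyRange_one_eq_nil (by omega)]
      simp [pvLoopA]

lemma pvGroups_eq (lines : List String) (X : Int) :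
    (PySem.List.enumerate lines).foldl
      (fun g p =>
        (PySem.List.pyRange 0 X).foldl
          (fun g x => g.modify (x - p.1) [] (fun l => l ++ [PySem.List.pyGetD p.2.toList x ' ']))
          g)
      PySem.Dict.empty
    = (pvPairs lines X).foldl (fun d q => d.modify q.1 [] (fun l => l ++ [q.2])) PySem.Dict.empty := by
  rw [pvPairs, List.foldl_flatMap]
  simp only [List.foldl_map]

lemma pvFilterRange_eq (j k : Int) : ∀ (n : Nat) (a b : Int), (b - a).toNat = n →
    (PySem.List.pyRange a b).filter (fun x => x - j == k)
      = if a ≤ j + k ∧ j + k < b then [j + k] else [] := by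
  intro n
  induction n with
  | zero =>
    intro a b h
    rw [PySem.List.pyRange_one_eq_nil (by omega), if_neg (by omega)]
    rfl
  | succ m ih =>
    intro a b h
    by_cases hab : a < b
    · rw [PySem.List.pyRange_one_cons hab, List.filter_cons, ih (a + 1) b (by omega)]
      by_cases ha : a = j + k
      · have hbeq : (a - j == k) = true := by simp; omega
        rw [if_neg (show ¬ (a + 1 ≤ j + k ∧ j + k < b) by omega),
          if_pos (show a ≤ j + k ∧ j + k < b by omega)]
        simp [ha]
      · have hbeq : (a - j == k) = false := by simp; omega
        simp only [hbeq, Bool.false_eq_true, if_false]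
        by_cases hc : a ≤ j + k ∧ j + k < b
        · rw [if_pos hc, if_pos (show a + 1 ≤ j + k ∧ j + k < b by omega)]
        · rw [if_neg hc, if_neg (show ¬ (a + 1 ≤ j + k ∧ j + k < b) by omega)]
    · rw [PySem.List.pyRange_one_eq_nil (by omega), if_neg (by omega)]
      rfl

lemma pvFlatMap_congr {α β : Type} (l : List α) (f g : α → List β)
    (h : ∀ x ∈ l, f x = g x) : l.flatMap f = l.flatMap g := by
  induction l with
  | nil => rfl
  | cons x xs ih =>
    rw [List.flatMap_cons, List.flatMap_cons, h x (by simp),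
      ih (fun y hy => h y (by simp [hy]))]

lemma pvMemKeys (lines : List String) (X : Int) (hX : 1 ≤ X) (hY : lines ≠ []) (k : Int) :
    k ∈ (pvPairs lines X).map (·.1) ↔ 1 - (lines.length : Int) ≤ k ∧ k < X := by
  rw [pvPairs]
  simp only [List.mem_map, List.mem_flatMap, PySem.List.mem_enumerate_iff,
    PySem.List.mem_pyRange_one]
  constructor
  · rintro ⟨q, ⟨p, ⟨⟨i, hi, rfl⟩, hq⟩⟩, rfl⟩
    simp only at hq
    obtain ⟨x, hx, rfl⟩ := hq
    simp only
    omega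
  · rintro ⟨h1, h2⟩
    have hlen : 1 ≤ lines.length := List.length_pos_iff.mpr hY
    have hiY : (-k).toNat < lines.length := by omega
    refine ⟨(k, PySem.List.pyGetD lines[(-k).toNat].toList ((((-k).toNat : Nat) : Int) + k) ' '),
      ⟨((((-k).toNat : Nat) : Int), lines[(-k).toNat]), ⟨(-k).toNat, hiY, by rw [zero_add]⟩, ?_⟩,
      rfl⟩
    simp only
    refine ⟨(((-k).toNat : Nat) : Int) + k, ⟨by omega, by omega⟩, ?_⟩
    rw [Prod.mk.injEq]
    exact ⟨by omega, rfl⟩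

lemma pvPairsFilter_eq (lines : List String) (X k : Int) (hY : lines ≠ [])
    (hk : 1 - (lines.length : Int) ≤ k) :
    ((pvPairs lines X).filter (fun q => q.1 == k)).map (·.2) = pvDiagSpec lines X k := by
  have hlen : 1 ≤ lines.length := List.length_pos_iff.mpr hY
  rw [pvPairs, List.filter_flatMap, List.map_flatMap,
    PySem.List.enumerate_eq_map_pyRange lines "", List.flatMap_map]
  have hinner : ∀ j : Int,
      (((PySem.List.pyRange 0 X).map
          (fun x => (x - j, PySem.List.pyGetD (PySem.List.pyGetD lines j "").toList x ' '))).filter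
        (fun q => q.1 == k)).map (·.2)
      = if 0 ≤ j + k ∧ j + k < X then [pvCharAt lines j k] else [] := by
    intro j
    rw [List.filter_map]
    have hcomp : ((fun (q : Int × Char) => q.1 == k) ∘
        (fun x => (x - j, PySem.List.pyGetD (PySem.List.pyGetD lines j "").toList x ' ')))
        = fun x => x - j == k := rfl
    rw [hcomp, pvFilterRange_eq j k ((X - 0).toNat) 0 X rfl]
    by_cases hc : 0 ≤ j + k ∧ j + k < X
    · rw [if_pos hc, if_pos hc]
      rfl
    · rw [if_neg hc, if_neg hc]
      rfl
  refine Eq.trans (pvFlatMap_congr _ _ _ (fun j _ => hinner j)) ?_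
  have hlenI : PySem.List.len lines = (lines.length : Int) := by
    simp [PySem.List.len]
  rw [pvDiagSpec, hlenI,
    PySem.List.pyRange_one_append 0 (max 0 (-k)) (lines.length : Int) (by omega) (by omega),
    List.flatMap_append]
  have hfront : (PySem.List.pyRange 0 (max 0 (-k))).flatMap
      (fun j => if 0 ≤ j + k ∧ j + k < X then [pvCharAt lines j k] else []) = [] := by
    rw [List.flatMap_eq_nil_iff]
    intro j hj
    rw [PySem.List.mem_pyRange_one] at hj
    rw [if_neg (by omega)]
  rw [hfront, List.nil_append]
  refine pvFlatMap_congr _ _ _ (fun j hj => ?_)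
  rw [PySem.List.mem_pyRange_one] at hj
  exact if_congr (by omega) rfl rfl

-- ===== VERDICT (by name: the statement is the Claim_ definition above) =====
theorem lines_diag_down_spec : Claim_equal_lines_diag_down := by
  intro lines _dom pre
  obtain ⟨hne, -⟩ := pre
  have hlen : 1 ≤ lines.length := List.length_pos_iff.mpr hne
  unfold Spec_lines_diag_down
  simp only [lines_diag_down, lines_diag_down_alt]
  set X := PySem.Str.len (PySem.List.pyGetD lines 0 "") with hXdef
  set Y := PySem.List.len lines with hYdef
  have hYI : Y = (lines.length : Int) := by simp [hYdef, PySem.List.len]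
  have hX0 : 0 ≤ X := by rw [hXdef, PySem.Str.len_eq]; exact Int.natCast_nonneg _
  rw [pvGroups_eq lines X]
  have hget : ∀ kk : Int,
      ((pvPairs lines X).foldl (fun d q => d.modify q.1 [] (fun l => l ++ [q.2]))
        PySem.Dict.empty).getD kk []
      = ((pvPairs lines X).filter (fun q => q.1 == kk)).map (·.2) := by
    intro kk
    rw [PySem.Dict.getD_foldl_modify_append (pvPairs lines X) PySem.Dict.empty kk,
      PySem.Dict.getD_empty, List.nil_append]
  by_cases hX : X ≤ 0
  · -- X = 0: both sides are []
    have hpairs : pvPairs lines X = [] := by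
      rw [pvPairs, List.flatMap_eq_nil_iff]
      intro p _
      rw [PySem.List.pyRange_one_eq_nil hX]
      rfl
    rw [hpairs]
    rw [PySem.List.pyRange_one_cons (show (0:Int) < X + Y by omega)]
    simp only [pvLoopA, List.foldl_nil]
    rw [pvSkipA_eq ((-(Y - 1 - 0)).toNat) 0 (Y - 1 - 0) rfl,
      if_neg (show ¬ Y - 1 - 0 < 0 by omega)]
    rw [if_pos (show (0 : Int) ≥ X by omega)]
    simp [PySem.Dict.keys_empty]
  · have hX : 1 ≤ X := by omega
    -- 1 ≤ X
    have hkeys : ((pvPairs lines X).foldl (fun d q => d.modify q.1 [] (fun l => l ++ [q.2]))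
        PySem.Dict.empty).keys = PySem.Set.ofList ((pvPairs lines X).map (·.1)) := by
      rw [PySem.Dict.keys_foldl_modify_key (pvPairs lines X) (fun q : Int × Char => q.1) []
        (fun _ q l => l ++ [q.2]) PySem.Dict.empty, PySem.Dict.keys_empty,
        PySem.Set.update_nil_left]
    have hperm : (PySem.List.pyRange (1 - Y) X).Perm
        (PySem.Set.ofList ((pvPairs lines X).map (·.1))) := by
      refine (List.perm_ext_iff_of_nodup (PySem.List.nodup_pyRange_one _ _)
        (PySem.Set.nodup_ofList _)).mpr (fun a => ?_)
      rw [PySem.List.mem_pyRange_one, PySem.Set.mem_ofList, pvMemKeys lines X hX hne]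
      omega
    have hsorted : PySem.List.sorted
        ((PySem.Set.ofList ((pvPairs lines X).map (·.1))) : List Int) (fun k => k)
        = PySem.List.pyRange (1 - Y) X :=
      PySem.List.sorted_eq_of_perm_of_pairwise_lt _ _ _ hperm
        (PySem.List.pairwise_lt_pyRange_one _ _)
    rw [hkeys, hsorted]
    rw [pvLoopA_eq lines X Y hX (by omega) hYdef ((X + Y - 0).toNat) 0 [] rfl le_rfl,
      List.nil_append]
    have hmapB : ∀ k ∈ PySem.List.pyRange (1 - Y) X,
        String.ofList (((pvPairs lines X).foldl
            (fun d q => d.modify q.1 [] (fun l => l ++ [q.2])) PySem.Dict.empty).getD k [])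
        = String.ofList (pvDiagSpec lines X k) := by
      intro k hk
      rw [PySem.List.mem_pyRange_one] at hk
      rw [hget k, pvPairsFilter_eq lines X k hne (by omega)]
    rw [List.map_congr_left hmapB]
    rw [PySem.List.pyRange_one 0 (X + Y - 1), PySem.List.pyRange_one (1 - Y) X,
      List.map_map, List.map_map]
    rw [show (X + Y - 1 - 0).toNat = (X - (1 - Y)).toNat from by omega]
    refine List.map_congr_left (fun n _ => ?_)
    show String.ofList (pvDiagSpec lines X ((0 + (n : Int)) - (Y - 1)))
       = String.ofList (pvDiagSpec lines X ((1 - Y) + (n : Int)))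
    rw [show (0 + (n : Int)) - (Y - 1) = (1 - Y) + (n : Int) from by omega]
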